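-- pv_equiv track=rewrite | github.com/sloweyyy/CS114.O11-22521145 | Wecode/Week 2/NgonNguCuaLan.py | has_valid_word_order
-- ===== SOURCE A (Python) =====
-- def is_adjective(word):
--     return word.endswith(("lios", "liala"))
--
-- def is_noun(word):
--     return word.endswith(("etr", "etra"))
--
-- def is_verb(word):
--     return word.endswith(("initis", "inites"))
--
-- def has_valid_word_order(words):
--     adjectives = []
--     nouns = []
--     verbs = []
--
--     for word in words:
--         if is_adjective(word):
--             adjectives.append(word)
--         elif is_noun(word):
--             nouns.append(word)
--         elif is_verb(word):
--             verbs.append(word)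
--
--     if not nouns:
--         return False
--
--     if adjectives:
--         if nouns[0] not in adjectives:
--             return False
--
--     if verbs:
--         if nouns[-1] not in verbs:
--             return False
--
--     return True
-- ===== SOURCE B (Python) =====
-- def has_valid_word_order(words):
--     has_noun = any(w.endswith(("etr", "etra")) for w in words)
--     has_adj = any(w.endswith(("lios", "liala")) for w in words)
--     has_verb = any(w.endswith(("initis", "inites")) for w in words)
--     return has_noun and not has_adj and not has_verb
-- ===== Notes on version B (the rewrite author's own statement) =====
-- stated objective: simpler
-- what changed: A classifies words into three lists and then runs membership checks that can never succeed (a string equal to an element of adjectives/verbs would have been classified the same way); B drops the lists and the checks entirely, computing three presence flags with any() and returning has_noun and not has_adj and not has_verb.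
import Mathlib
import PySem

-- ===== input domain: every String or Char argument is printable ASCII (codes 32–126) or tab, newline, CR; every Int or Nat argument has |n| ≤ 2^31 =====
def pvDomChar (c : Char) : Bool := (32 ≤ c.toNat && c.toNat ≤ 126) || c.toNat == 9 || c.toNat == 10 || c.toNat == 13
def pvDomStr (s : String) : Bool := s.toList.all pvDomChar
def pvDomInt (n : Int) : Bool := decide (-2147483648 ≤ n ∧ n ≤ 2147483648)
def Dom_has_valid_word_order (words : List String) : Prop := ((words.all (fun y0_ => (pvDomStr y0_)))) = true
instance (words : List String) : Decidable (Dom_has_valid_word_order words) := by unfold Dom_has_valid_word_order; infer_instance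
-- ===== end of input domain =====

-- B drops A's three classification lists and vacuous membership checks, computing three presence flags instead (simpler).

-- ===== PORT A =====
def is_adjective (word : String) : Bool :=
  PySem.Str.endswith word "lios" || PySem.Str.endswith word "liala"

def is_noun (word : String) : Bool :=
  PySem.Str.endswith word "etr" || PySem.Str.endswith word "etra"

def is_verb (word : String) : Bool :=
  PySem.Str.endswith word "initis" || PySem.Str.endswith word "inites"

def has_valid_word_order (words : List String) : Bool :=
  let st := words.foldl
    (fun (st : List String × List String × List String) word =>
      let (adjectives, nouns, verbs) := st
      if is_adjective word then (adjectives ++ [word], nouns, verbs)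
      else if is_noun word then (adjectives, nouns ++ [word], verbs)
      else if is_verb word then (adjectives, nouns, verbs ++ [word])
      else (adjectives, nouns, verbs))
    ([], [], [])
  let (adjectives, nouns, verbs) := st
  match nouns with
  | [] => false
  | n0 :: rest =>
    if !adjectives.isEmpty && !adjectives.contains n0 then false
    else if !verbs.isEmpty && !verbs.contains ((n0 :: rest).getLast (List.cons_ne_nil _ _)) then false
    else true

-- ===== PORT B =====
def has_valid_word_order_alt (words : List String) : Bool :=
  let has_noun := words.any (fun w => PySem.Str.endswith w "etr" || PySem.Str.endswith w "etra")
  let has_adj := words.any (fun w => PySem.Str.endswith w "lios" || PySem.Str.endswith w "liala")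
  let has_verb := words.any (fun w => PySem.Str.endswith w "initis" || PySem.Str.endswith w "inites")
  has_noun && !has_adj && !has_verb

-- ===== PRECONDITION & SPEC =====
def Spec_has_valid_word_order (words : List String) (out : Bool) : Prop := out = has_valid_word_order_alt words
instance (words : List String) (out : Bool) : Decidable (Spec_has_valid_word_order words out) := by unfold Spec_has_valid_word_order; infer_instance

-- ===== CLAIM (what is proved, stated in full; the proofs are below) =====
def Claim_equal_has_valid_word_order : Prop := ∀ (words : List String), Dom_has_valid_word_order words → Spec_has_valid_word_order words (has_valid_word_order words)

-- ===== LEMMAS AND PROOFS =====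

-- the fold builds exactly three filters
theorem fold_filters (words : List String) (a n v : List String) :
    words.foldl
      (fun (st : List String × List String × List String) word =>
        let (adjectives, nouns, verbs) := st
        if is_adjective word then (adjectives ++ [word], nouns, verbs)
        else if is_noun word then (adjectives, nouns ++ [word], verbs)
        else if is_verb word then (adjectives, nouns, verbs ++ [word])
        else (adjectives, nouns, verbs))
      (a, n, v)
    = (a ++ words.filter (fun w => is_adjective w),
       n ++ words.filter (fun w => !is_adjective w && is_noun w),
       v ++ words.filter (fun w => !is_adjective w && !is_noun w && is_verb w)) := by
  induction words generalizing a n v with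
  | nil => simp
  | cons w ws ih =>
    by_cases ha : is_adjective w <;> by_cases hn : is_noun w <;> by_cases hv : is_verb w <;>
      simp [List.foldl_cons, ha, hn, hv, ih]

-- a word cannot be both a noun and a verb (suffixes "etr"/"etra" vs "initis"/"inites" are incompatible)
theorem noun_not_verb (w : String) (h : is_noun w = true) : is_verb w = false := by
  by_contra hv
  rw [Bool.not_eq_false] at hv
  unfold is_noun at h
  unfold is_verb at hv
  rw [Bool.or_eq_true, PySem.Str.endswith_eq, PySem.Str.endswith_eq,
      PySem.Chars.endswith_iff, PySem.Chars.endswith_iff] at h hv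
  have key : ∀ (p q : List Char), p <:+ w.toList → q <:+ w.toList →
      p.length ≤ q.length → p <:+ q := by
    intro p q hp hq hl
    rw [← List.reverse_prefix] at hp hq ⊢
    exact List.prefix_of_prefix_length_le hp hq (by simpa using hl)
  rcases h with h | h <;> rcases hv with hv | hv
  · exact absurd (key _ _ h hv (by decide)) (by decide)
  · exact absurd (key _ _ h hv (by decide)) (by decide)
  · exact absurd (key _ _ h hv (by decide)) (by decide)
  · exact absurd (key _ _ h hv (by decide)) (by decide)

-- every member of a filtered list satisfies the (boolean) filter
theorem mem_filter_bool {p : String → Bool} {xs : List String} {x : String}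
    (h : x ∈ xs.filter p) : p x = true := (List.mem_filter.mp h).2

-- ===== VERDICT (by name: the statement is the Claim_ definition above) =====
theorem has_valid_word_order_spec : Claim_equal_has_valid_word_order := by
  intro words _
  unfold Spec_has_valid_word_order has_valid_word_order has_valid_word_order_alt
  rw [fold_filters]
  simp only [List.nil_append]
  show _ = (((words.any fun w => is_noun w) && !(words.any fun w => is_adjective w)) &&
      !(words.any fun w => is_verb w))
  by_cases hadj : (words.any fun w => is_adjective w) = true
  · -- an adjective exists: both sides are false
    rw [hadj]
    have hne : words.filter (fun w => is_adjective w) ≠ [] := by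
      rw [List.any_eq_true] at hadj
      obtain ⟨w, hw, hwp⟩ := hadj
      intro hnil
      exact absurd ((List.filter_eq_nil_iff.mp hnil) w hw) (by simp [hwp])
    cases hn : words.filter (fun w => !is_adjective w && is_noun w) with
    | nil => simp
    | cons n0 rest =>
      have hn0 : n0 ∈ words.filter (fun w => !is_adjective w && is_noun w) := by
        rw [hn]; exact List.mem_cons_self
      have hn0a : is_adjective n0 = false := by
        have := mem_filter_bool hn0
        simp only [Bool.and_eq_true, Bool.not_eq_true'] at this
        exact this.1
      simp [List.isEmpty_eq_false_iff.mpr hne]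
      intro _ h2
      exact absurd h2 (by simp [hn0a])
  · rw [Bool.not_eq_true] at hadj
    rw [hadj]
    have hA : words.filter (fun w => is_adjective w) = [] := by
      rw [List.filter_eq_nil_iff]
      intro w hw
      rw [List.any_eq_false] at hadj
      simpa using hadj w hw
    cases hn : words.filter (fun w => !is_adjective w && is_noun w) with
    | nil =>
      have hnoun : (words.any fun w => is_noun w) = false := by
        rw [List.any_eq_false]
        intro w hw
        rw [List.filter_eq_nil_iff] at hn
        have h1 := hn w hw
        rw [List.any_eq_false] at hadj
        have h2 := hadj w hw
        simp only [Bool.and_eq_true, Bool.not_eq_true', not_and] at h1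
        simp only [Bool.not_eq_true] at *
        exact h1 h2
      rw [hnoun]; simp
    | cons n0 rest =>
      have hnoun : (words.any fun w => is_noun w) = true := by
        have hm : n0 ∈ words.filter (fun w => !is_adjective w && is_noun w) := by
          rw [hn]; exact List.mem_cons_self
        have h2 := mem_filter_bool hm
        simp only [Bool.and_eq_true] at h2
        rw [List.any_eq_true]
        exact ⟨n0, (List.mem_filter.mp hm).1, h2.2⟩
      rw [hnoun]
      have hnl : is_noun ((n0 :: rest).getLast (List.cons_ne_nil _ _)) = true := by
        have hnlast : (n0 :: rest).getLast (List.cons_ne_nil _ _) ∈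
            words.filter (fun w => !is_adjective w && is_noun w) := by
          rw [hn]; exact List.getLast_mem _
        have := mem_filter_bool hnlast
        simp only [Bool.and_eq_true] at this
        exact this.2
      by_cases hverb : (words.any fun w => is_verb w) = true
      · -- a verb-suffixed word exists; it is not a noun, so A's verbs list is nonempty: both false
        rw [hverb]
        have hvne : words.filter (fun w => !is_adjective w && !is_noun w && is_verb w) ≠ [] := by
          rw [List.any_eq_true] at hverb
          obtain ⟨w, hw, hwv⟩ := hverb
          have hwa : is_adjective w = false := by
            rw [List.any_eq_false] at hadj; simpa using hadj w hw
          have hwn : is_noun w = false := by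
            cases h : is_noun w
            · rfl
            · rw [noun_not_verb w h] at hwv; exact absurd hwv (by decide)
          intro hnil
          have := (List.filter_eq_nil_iff.mp hnil) w hw
          simp [hwa, hwn, hwv] at this
        simp [hA, List.isEmpty_eq_false_iff.mpr hvne]
        intro _ _ h3
        rw [h3] at hnl
        exact absurd hnl (by decide)
      · -- no verb-suffixed word: A's verbs list is empty too, both sides true
        rw [Bool.not_eq_true] at hverb
        rw [hverb]
        have hV : words.filter (fun w => !is_adjective w && !is_noun w && is_verb w) = [] := by
          rw [List.filter_eq_nil_iff]
          intro w hw
          rw [List.any_eq_false] at hverb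
          simp [hverb w hw]
        simp [hA, hV]
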